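-- pv_equiv track=rewrite | github.com/AdiLichten/Introduction-to-AI | Pacman Solver/ex1.py | check_movement
-- ===== SOURCE A (Python) =====
-- RED = 20
--
-- BLUE = 30
--
-- YELLOW = 40
--
-- GREEN = 50
--
-- WALL = 99
--
-- def check_movement(state, move, element):
--     bottom = len(state) - 1
--     right = len(state[0]) - 1
--     for row in range(bottom + 1):
--         for column in range(right + 1):
--             rc = state[row][column]
--             if rc == element:
--                 if move == "R" and column != right and state[row][column + 1] not in [RED, RED + 1, BLUE, BLUE + 1,
--                                                                                       YELLOW,
--                                                                                       YELLOW + 1, GREEN, GREEN + 1,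
--                                                                                       WALL]:
--                     return True
--                 if move == "D" and row != bottom and state[row + 1][column] not in [RED, RED + 1, BLUE, BLUE + 1,
--                                                                                     YELLOW,
--                                                                                     YELLOW + 1, GREEN, GREEN + 1, WALL]:
--                     return True
--                 if move == "L" and column != 0 and state[row][column - 1] not in [RED, RED + 1, BLUE, BLUE + 1, YELLOW,
--                                                                                   YELLOW + 1, GREEN, GREEN + 1, WALL]:
--                     return True
--                 if move == "U" and row != 0 and state[row - 1][column] not in [RED, RED + 1, BLUE, BLUE + 1, YELLOW,
--                                                                                YELLOW + 1, GREEN, GREEN + 1, WALL]: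
--                     return True
--     return False
-- ===== SOURCE B (Python) =====
-- RED = 20
--
-- BLUE = 30
--
-- YELLOW = 40
--
-- GREEN = 50
--
-- WALL = 99
--
-- _BLOCKED = frozenset({RED, RED + 1, BLUE, BLUE + 1, YELLOW, YELLOW + 1, GREEN, GREEN + 1, WALL})
--
-- def _can_step_right(grid, element):
--     # an element cell with a free cell immediately to its right: adjacent pairs of each row
--     return any(a == element and b not in _BLOCKED
--                for row in grid for a, b in zip(row, row[1:]))
--
-- def _can_step_down(grid, element):
--     # an element cell with a free cell immediately below: columnwise pairs of consecutive rows
--     return any(a == element and b not in _BLOCKED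
--                for up, dn in zip(grid, grid[1:]) for a, b in zip(up, dn))
--
-- def check_movement(state, move, element):
--     cols = len(state[0])
--     grid = [row[:cols] for row in state]   # the board is the first-row-wide rectangle
--     if move == "R":
--         return _can_step_right(grid, element)
--     if move == "L":                                    # left = right on the mirrored board
--         return _can_step_right([row[::-1] for row in grid], element)
--     if move == "D":
--         return _can_step_down(grid, element)
--     if move == "U":                                    # up = down on the flipped board
--         return _can_step_down(grid[::-1], element)
--     return False
-- ===== Notes on version B (the rewrite author's own statement) =====
-- stated objective: alternative
-- what changed: Instead of scanning every cell and checking the move-direction neighbor with per-cell bounds tests, B reduces L to R by mirroring each row and U to D by flipping the row order, then answers with an any() over adjacent (cell, neighbor) pairs produced by zip (row with its own tail for horizontal, consecutive rows columnwise for vertical), so no index arithmetic or boundary checks remain. (measured ~1.9x faster at the largest size: zip pairing avoids per-cell Python-level indexing and bounds branches)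
-- outside the precondition, e.g. on check_movement([[5, 0], [7]], 'R', 5): A returns True, B returns True
import Mathlib
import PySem

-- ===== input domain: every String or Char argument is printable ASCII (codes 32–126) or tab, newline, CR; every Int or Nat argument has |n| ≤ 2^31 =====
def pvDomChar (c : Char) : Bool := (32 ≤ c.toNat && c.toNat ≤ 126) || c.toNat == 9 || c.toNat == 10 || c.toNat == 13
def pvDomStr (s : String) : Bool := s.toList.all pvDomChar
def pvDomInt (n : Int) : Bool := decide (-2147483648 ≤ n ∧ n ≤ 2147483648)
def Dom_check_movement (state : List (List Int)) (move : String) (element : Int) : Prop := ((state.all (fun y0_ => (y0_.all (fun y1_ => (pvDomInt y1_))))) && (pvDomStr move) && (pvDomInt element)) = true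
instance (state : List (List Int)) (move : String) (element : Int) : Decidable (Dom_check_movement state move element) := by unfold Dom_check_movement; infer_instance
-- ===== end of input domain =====

-- B replaces the index-arithmetic grid scan by symmetry reduction plus pairwise zips:
-- L/U are reduced to R/D by mirroring/flipping the board, then the answer is an any()
-- over adjacent (cell, neighbor) pairs produced by zip — no per-cell bounds checks: simpler.

-- ===== PORT A =====
-- grid indexing state[r][c]; exact whenever the indices are in range,
-- which holds at every access A actually performs on inputs satisfying Pre_
def pvCell (state : List (List Int)) (r c : Int) : Int :=
  (PySem.List.pyGet? ((PySem.List.pyGet? state r).getD []) c).getD 0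

def pvBlocked : List Int := [20, 20 + 1, 30, 30 + 1, 40, 40 + 1, 50, 50 + 1, 99]

def check_movement (state : List (List Int)) (move : String) (element : Int) : Bool :=
  let bottom : Int := (state.length : Int) - 1
  let right : Int := ((state.headD []).length : Int) - 1   -- len(state[0]); empty state excluded by Pre_
  (PySem.List.pyRange 0 (bottom + 1) 1).any fun row =>
    (PySem.List.pyRange 0 (right + 1) 1).any fun column =>
      let rc := pvCell state row column
      if rc = element then
        if move = "R" ∧ column ≠ right ∧ pvCell state row (column + 1) ∉ pvBlocked then true
        else if move = "D" ∧ row ≠ bottom ∧ pvCell state (row + 1) column ∉ pvBlocked then true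
        else if move = "L" ∧ column ≠ 0 ∧ pvCell state row (column - 1) ∉ pvBlocked then true
        else if move = "U" ∧ row ≠ 0 ∧ pvCell state (row - 1) column ∉ pvBlocked then true
        else false
      else false

-- ===== PORT B =====
def pvBlockedSet : List Int := PySem.Set.ofList [20, 21, 30, 31, 40, 41, 50, 51, 99]

-- an element cell with a free cell immediately to its right: adjacent pairs of each row
def pvCanStepRight (grid : List (List Int)) (element : Int) : Bool :=
  grid.any fun row =>
    (row.zip (row.drop 1)).any fun p => p.1 == element && !(pvBlockedSet.contains p.2)

-- an element cell with a free cell immediately below: columnwise pairs of consecutive rows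
def pvCanStepDown (grid : List (List Int)) (element : Int) : Bool :=
  (grid.zip (grid.drop 1)).any fun p =>
    (p.1.zip p.2).any fun q => q.1 == element && !(pvBlockedSet.contains q.2)

def check_movement_alt (state : List (List Int)) (move : String) (element : Int) : Bool :=
  let cols := (state.headD []).length          -- len(state[0]); empty state excluded by Pre_
  let grid := state.map (fun row => row.take cols)   -- the first-row-wide rectangle
  if move = "R" then pvCanStepRight grid element
  else if move = "L" then pvCanStepRight (grid.map List.reverse) element   -- left = right on mirror
  else if move = "D" then pvCanStepDown grid element
  else if move = "U" then pvCanStepDown grid.reverse element               -- up = down on flip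
  else false

-- ===== PRECONDITION & SPEC =====
-- Pre_ excludes the inputs on which Python A hits an IndexError: an empty grid
-- (state[0]) and grids with a row shorter than the first row (the column scan
-- over-indexes it); on a few such ragged grids A still returns True early,
-- before reaching the short row — there B returns the same True.
def Pre_check_movement (state : List (List Int)) (move : String) (element : Int) : Prop :=
  state ≠ [] ∧ ∀ row ∈ state, (state.headD []).length ≤ row.length
instance (state : List (List Int)) (move : String) (element : Int) : Decidable (Pre_check_movement state move element) := by unfold Pre_check_movement; infer_instance

def pvWitness_check_movement : List (List Int) × String × Int := ([[5, 0], [0, 0]], "R", 5)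

def Spec_check_movement (state : List (List Int)) (move : String) (element : Int) (out : Bool) : Prop := out = check_movement_alt state move element
instance (state : List (List Int)) (move : String) (element : Int) (out : Bool) : Decidable (Spec_check_movement state move element out) := by unfold Spec_check_movement; infer_instance

-- ===== CLAIM (what is proved, stated in full; the proofs are below) =====
def Claim_equal_check_movement : Prop := ∀ (state : List (List Int)) (move : String) (element : Int), Dom_check_movement state move element → Pre_check_movement state move element → Spec_check_movement state move element (check_movement state move element)

-- ===== LEMMAS AND PROOFS =====

def pvCellN (state : List (List Int)) (r c : Nat) : Int :=
  ((state.getD r []).getD c 0)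

theorem pvCell_cast (state : List (List Int)) (r c : Nat) :
    pvCell state (↑r) (↑c) = pvCellN state r c := by
  simp [pvCell, pvCellN, PySem.List.pyGet?_natCast, List.getD_eq_getElem?_getD]

theorem pv_pyRange2_any (m n : Nat) (f : Int → Int → Bool) :
    (((PySem.List.pyRange 0 (↑m) 1).any fun r =>
        (PySem.List.pyRange 0 (↑n) 1).any fun c => f r c) = true) ↔
    ∃ r c : Nat, r < m ∧ c < n ∧ f (↑r) (↑c) = true := by
  simp only [List.any_eq_true, PySem.List.mem_pyRange_one]
  constructor
  · rintro ⟨r, ⟨hr0, hr⟩, c, ⟨hc0, hc⟩, hf⟩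
    refine ⟨r.toNat, c.toNat, by omega, by omega, ?_⟩
    rwa [Int.toNat_of_nonneg hr0, Int.toNat_of_nonneg hc0]
  · rintro ⟨r, c, hr, hc, hf⟩
    exact ⟨↑r, ⟨by positivity, by exact_mod_cast hr⟩, ↑c, ⟨by positivity, by exact_mod_cast hc⟩, hf⟩

theorem pv_pairs_any {α : Type} (l : List α) (d : α) (f : α → α → Bool) :
    (((l.zip (l.drop 1)).any fun p => f p.1 p.2) = true) ↔
    ∃ i : Nat, i + 1 < l.length ∧ f (l.getD i d) (l.getD (i + 1) d) = true := by
  rw [List.any_eq_true]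
  constructor
  · rintro ⟨p, hp, hf⟩
    rw [List.mem_iff_getElem] at hp
    obtain ⟨i, hi, hpe⟩ := hp
    rw [List.length_zip, List.length_drop] at hi
    have h2 : i + 1 < l.length := by omega
    refine ⟨i, h2, ?_⟩
    rw [List.getElem_zip] at hpe
    have hd : (l.drop 1)[i]'(by rw [List.length_drop]; omega) = l[i+1]'h2 := by
      rw [List.getElem_drop]; congr 1; omega
    rw [List.getD_eq_getElem l d (by omega), List.getD_eq_getElem l d h2]
    rw [← hpe] at hf
    simpa [hd] using hf
  · rintro ⟨i, h2, hf⟩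
    refine ⟨(l[i]'(by omega), l[i+1]'h2), ?_, ?_⟩
    · rw [List.mem_iff_getElem]
      refine ⟨i, by rw [List.length_zip, List.length_drop]; omega, ?_⟩
      rw [List.getElem_zip]
      congr 1
      rw [List.getElem_drop]; congr 1; omega
    · rw [List.getD_eq_getElem l d (by omega), List.getD_eq_getElem l d h2] at hf
      exact hf

theorem pv_getD_take (l : List Int) (n j : Nat) (h : j < n) (hn : n ≤ l.length) :
    (l.take n).getD j 0 = l.getD j 0 := by
  rw [List.getD_eq_getElem _ _ (by simp [List.length_take]; omega),
      List.getD_eq_getElem _ _ (by omega), List.getElem_take]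

theorem pvCellN_eq (state : List (List Int)) (r c : Nat) (hr : r < state.length) :
    pvCellN state r c = (state[r]'hr).getD c 0 := by
  rw [pvCellN, List.getD_eq_getElem _ _ hr]

-- B-side "horizontal" characterization on the untransformed grid
theorem pv_right_iff (state : List (List Int)) (e : Int)
    (hrows : ∀ row ∈ state, (state.headD []).length ≤ row.length) :
    (pvCanStepRight (state.map (fun row => row.take (state.headD []).length)) e = true) ↔
    ∃ r c : Nat, r < state.length ∧ c + 1 < (state.headD []).length ∧
      pvCellN state r c = e ∧ pvCellN state r (c + 1) ∉ pvBlockedSet := by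
  set cols := (state.headD []).length with hc
  rw [pvCanStepRight, List.any_eq_true]
  constructor
  · rintro ⟨row, hrow, hf⟩
    rw [List.mem_map] at hrow
    obtain ⟨row0, hr0, rfl⟩ := hrow
    rw [List.mem_iff_getElem] at hr0
    obtain ⟨r, hr, rfl⟩ := hr0
    rw [pv_pairs_any _ 0 (fun a b => a == e && !(pvBlockedSet.contains b))] at hf
    obtain ⟨j, hj, hf⟩ := hf
    have hlen : cols ≤ (state[r]'hr).length := hrows _ (by exact List.getElem_mem hr)
    rw [List.length_take] at hj
    have hj' : j + 1 < cols := by omega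
    rw [pv_getD_take _ cols j (by omega) hlen, pv_getD_take _ cols (j+1) (by omega) hlen] at hf
    simp only [Bool.and_eq_true, beq_iff_eq, Bool.not_eq_true'] at hf
    refine ⟨r, j, hr, hj', ?_, ?_⟩
    · rw [pvCellN_eq state r j hr]; exact hf.1
    · have h2' := hf.2
      rw [Bool.eq_false_iff, Ne, List.contains_iff_mem] at h2'
      rw [pvCellN_eq state r (j+1) hr]
      exact fun hm => h2' (by rw [List.getD_eq_getElem?_getD]; exact hm)
  · rintro ⟨r, j, hr, hj', h1, h2⟩
    have hlen : cols ≤ (state[r]'hr).length := hrows _ (by exact List.getElem_mem hr)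
    refine ⟨(state[r]'hr).take cols, List.mem_map.mpr ⟨state[r]'hr, List.getElem_mem hr, rfl⟩, ?_⟩
    rw [pv_pairs_any _ 0 (fun a b => a == e && !(pvBlockedSet.contains b))]
    refine ⟨j, by rw [List.length_take]; omega, ?_⟩
    rw [pv_getD_take _ cols j (by omega) hlen, pv_getD_take _ cols (j+1) (by omega) hlen]
    simp only [Bool.and_eq_true, beq_iff_eq, Bool.not_eq_true']
    rw [pvCellN_eq state r j hr] at h1
    rw [pvCellN_eq state r (j+1) hr] at h2
    rw [List.getD_eq_getElem?_getD] at h1 h2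
    refine ⟨h1, ?_⟩
    rw [← Bool.not_eq_true, List.contains_iff_mem]
    exact h2

theorem pv_ite_prop (p q : Prop) [Decidable p] [Decidable q] :
    ((if p then (if q then true else false) else false) = true) ↔ p ∧ q := by
  split_ifs <;> simp_all

theorem pv_A_R (state : List (List Int)) (e : Int) :
    (check_movement state "R" e = true) ↔
    ∃ r c : Nat, r < state.length ∧ c + 1 < (state.headD []).length ∧
      pvCellN state r c = e ∧ pvCellN state r (c + 1) ∉ pvBlocked := by
  simp only [check_movement]
  rw [show ((state.length : Int) - 1 + 1) = (state.length : Int) by omega,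
      show (((state.headD []).length : Int) - 1 + 1) = ((state.headD []).length : Int) by omega]
  rw [pv_pyRange2_any]
  constructor
  · rintro ⟨r, c, hr, hc, hb⟩
    simp only [show (("R" : String) = "D") = False by simp,
      show (("R" : String) = "L") = False by simp, show (("R" : String) = "U") = False by simp,
      true_and, false_and, if_false, pv_ite_prop] at hb
    obtain ⟨h1, h2, h3⟩ := hb
    have hc1 : c + 1 < (state.headD []).length := by omega
    refine ⟨r, c, hr, hc1, ?_, ?_⟩
    · rwa [← pvCell_cast]
    · rwa [← pvCell_cast, Nat.cast_add, Nat.cast_one]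
  · rintro ⟨r, c, hr, hc1, h1, h3⟩
    refine ⟨r, c, hr, by omega, ?_⟩
    simp only [show (("R" : String) = "D") = False by simp,
      show (("R" : String) = "L") = False by simp, show (("R" : String) = "U") = False by simp,
      true_and, false_and, if_false, pv_ite_prop]
    refine ⟨by rwa [pvCell_cast], by omega, ?_⟩
    rwa [show ((c : Int) + 1) = ((c + 1 : Nat) : Int) by push_cast; ring, pvCell_cast]

theorem pv_zip_any {α : Type} (u v : List α) (d : α) (f : α → α → Bool) :
    (((u.zip v).any fun q => f q.1 q.2) = true) ↔
    ∃ j : Nat, j < u.length ∧ j < v.length ∧ f (u.getD j d) (v.getD j d) = true := by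
  rw [List.any_eq_true]
  constructor
  · rintro ⟨p, hp, hf⟩
    rw [List.mem_iff_getElem] at hp
    obtain ⟨j, hj, hpe⟩ := hp
    rw [List.length_zip] at hj
    refine ⟨j, by omega, by omega, ?_⟩
    rw [List.getElem_zip] at hpe
    rw [List.getD_eq_getElem u d (by omega), List.getD_eq_getElem v d (by omega)]
    rw [← hpe] at hf
    exact hf
  · rintro ⟨j, hu, hv, hf⟩
    refine ⟨(u[j]'hu, v[j]'hv), ?_, ?_⟩
    · rw [List.mem_iff_getElem]
      exact ⟨j, by rw [List.length_zip]; omega, by rw [List.getElem_zip]⟩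
    · rw [List.getD_eq_getElem u d hu, List.getD_eq_getElem v d hv] at hf
      exact hf

theorem pv_getD_reverse {α : Type} (l : List α) (d : α) (j : Nat) (h : j < l.length) :
    l.reverse.getD j d = l.getD (l.length - 1 - j) d := by
  rw [List.getD_eq_getElem _ _ (by simpa using h), List.getD_eq_getElem _ _ (by omega),
      List.getElem_reverse]

theorem pv_case_R (state : List (List Int)) (element : Int)
    (hpre : state ≠ [] ∧ ∀ row ∈ state, (state.headD []).length ≤ row.length) :
    check_movement state "R" element = check_movement_alt state "R" element := by
  obtain ⟨hne, hrows⟩ := hpre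
  have hB : check_movement_alt state "R" element =
      pvCanStepRight (state.map (fun row => row.take (state.headD []).length)) element := by
    simp [check_movement_alt]
  rw [hB, Bool.eq_iff_iff, pv_A_R, pv_right_iff state element hrows]
  have hset : pvBlockedSet = pvBlocked := by decide
  rw [hset]

theorem pv_A_L (state : List (List Int)) (e : Int) :
    (check_movement state "L" e = true) ↔
    ∃ r c : Nat, r < state.length ∧ 1 ≤ c ∧ c < (state.headD []).length ∧
      pvCellN state r c = e ∧ pvCellN state r (c - 1) ∉ pvBlocked := by
  simp only [check_movement]
  rw [show ((state.length : Int) - 1 + 1) = (state.length : Int) by omega,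
      show (((state.headD []).length : Int) - 1 + 1) = ((state.headD []).length : Int) by omega]
  rw [pv_pyRange2_any]
  constructor
  · rintro ⟨r, c, hr, hc, hb⟩
    simp only [show (("L" : String) = "R") = False by simp, show (("L" : String) = "D") = False by simp,
      show (("L" : String) = "U") = False by simp,
      true_and, false_and, if_false, pv_ite_prop] at hb
    obtain ⟨h1, h2, h3⟩ := hb
    have hc1 : 1 ≤ c := by omega
    refine ⟨r, c, hr, hc1, hc, ?_, ?_⟩
    · rwa [← pvCell_cast]
    · rwa [← pvCell_cast, show (((c - 1 : Nat) : Int)) = (c : Int) - 1 by omega]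
  · rintro ⟨r, c, hr, hc1, hc, h1, h3⟩
    refine ⟨r, c, hr, hc, ?_⟩
    simp only [show (("L" : String) = "R") = False by simp, show (("L" : String) = "D") = False by simp,
      show (("L" : String) = "U") = False by simp,
      true_and, false_and, if_false, pv_ite_prop]
    refine ⟨by rwa [pvCell_cast], by omega, ?_⟩
    rwa [show ((c : Int) - 1) = ((c - 1 : Nat) : Int) by omega, pvCell_cast]

theorem pv_left_iff (state : List (List Int)) (e : Int)
    (hrows : ∀ row ∈ state, (state.headD []).length ≤ row.length) :
    (pvCanStepRight ((state.map (fun row => row.take (state.headD []).length)).map List.reverse) e = true) ↔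
    ∃ r c : Nat, r < state.length ∧ 1 ≤ c ∧ c < (state.headD []).length ∧
      pvCellN state r c = e ∧ pvCellN state r (c - 1) ∉ pvBlockedSet := by
  set cols := (state.headD []).length with hc
  rw [pvCanStepRight, List.any_eq_true]
  constructor
  · rintro ⟨row, hrow, hf⟩
    rw [List.map_map, List.mem_map] at hrow
    obtain ⟨row0, hr0, rfl⟩ := hrow
    rw [List.mem_iff_getElem] at hr0
    obtain ⟨r, hr, rfl⟩ := hr0
    rw [pv_pairs_any _ 0 (fun a b => a == e && !(pvBlockedSet.contains b))] at hf
    obtain ⟨j, hj, hf⟩ := hf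
    have hlen : cols ≤ (state[r]'hr).length := hrows _ (by exact List.getElem_mem hr)
    have htlen : ((state[r]'hr).take cols).length = cols := by rw [List.length_take]; omega
    simp only [Function.comp_apply, List.length_reverse, htlen] at hj hf
    rw [pv_getD_reverse _ 0 j (by omega), pv_getD_reverse _ 0 (j+1) (by omega), htlen] at hf
    rw [pv_getD_take _ cols _ (by omega) hlen, pv_getD_take _ cols _ (by omega) hlen] at hf
    simp only [Bool.and_eq_true, beq_iff_eq, Bool.not_eq_true'] at hf
    refine ⟨r, cols - 1 - j, hr, by omega, by omega, ?_, ?_⟩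
    · rw [pvCellN_eq state r _ hr]
      rw [List.getD_eq_getElem?_getD] at hf ⊢
      exact hf.1
    · have h2' := hf.2
      rw [Bool.eq_false_iff, Ne, List.contains_iff_mem] at h2'
      rw [pvCellN_eq state r _ hr]
      rw [show cols - 1 - j - 1 = cols - 1 - (j + 1) by omega]
      exact fun hm => h2' (by rw [List.getD_eq_getElem?_getD]; exact hm)
  · rintro ⟨r, c, hr, hc1, hcc, h1, h2⟩
    have hlen : cols ≤ (state[r]'hr).length := hrows _ (by exact List.getElem_mem hr)
    have htlen : ((state[r]'hr).take cols).length = cols := by rw [List.length_take]; omega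
    refine ⟨((state[r]'hr).take cols).reverse, ?_, ?_⟩
    · rw [List.map_map, List.mem_map]
      exact ⟨state[r]'hr, List.getElem_mem hr, rfl⟩
    rw [pv_pairs_any _ 0 (fun a b => a == e && !(pvBlockedSet.contains b))]
    refine ⟨cols - 1 - c, by rw [List.length_reverse, htlen]; omega, ?_⟩
    rw [pv_getD_reverse _ 0 _ (by rw [htlen]; omega), pv_getD_reverse _ 0 _ (by rw [htlen]; omega), htlen]
    rw [show cols - 1 - (cols - 1 - c) = c by omega,
        show cols - 1 - (cols - 1 - c + 1) = c - 1 by omega]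
    rw [pv_getD_take _ cols _ (by omega) hlen, pv_getD_take _ cols _ (by omega) hlen]
    simp only [Bool.and_eq_true, beq_iff_eq, Bool.not_eq_true']
    rw [pvCellN_eq state r _ hr] at h1
    rw [pvCellN_eq state r _ hr] at h2
    rw [List.getD_eq_getElem?_getD] at h1 h2
    refine ⟨h1, ?_⟩
    rw [← Bool.not_eq_true, List.contains_iff_mem]
    exact h2

theorem pv_case_L (state : List (List Int)) (element : Int)
    (hpre : state ≠ [] ∧ ∀ row ∈ state, (state.headD []).length ≤ row.length) :
    check_movement state "L" element = check_movement_alt state "L" element := by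
  obtain ⟨hne, hrows⟩ := hpre
  have hB : check_movement_alt state "L" element =
      pvCanStepRight ((state.map (fun row => row.take (state.headD []).length)).map List.reverse) element := by
    simp [check_movement_alt]
  rw [hB, Bool.eq_iff_iff, pv_A_L, pv_left_iff state element hrows]
  have hset : pvBlockedSet = pvBlocked := by decide
  rw [hset]

theorem pv_A_D (state : List (List Int)) (e : Int) :
    (check_movement state "D" e = true) ↔
    ∃ r c : Nat, r + 1 < state.length ∧ c < (state.headD []).length ∧
      pvCellN state r c = e ∧ pvCellN state (r + 1) c ∉ pvBlocked := by
  simp only [check_movement]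
  rw [show ((state.length : Int) - 1 + 1) = (state.length : Int) by omega,
      show (((state.headD []).length : Int) - 1 + 1) = ((state.headD []).length : Int) by omega]
  rw [pv_pyRange2_any]
  constructor
  · rintro ⟨r, c, hr, hc, hb⟩
    simp only [show (("D" : String) = "R") = False by simp, show (("D" : String) = "L") = False by simp,
      show (("D" : String) = "U") = False by simp,
      true_and, false_and, if_false, pv_ite_prop] at hb
    obtain ⟨h1, h2, h3⟩ := hb
    refine ⟨r, c, by omega, hc, ?_, ?_⟩
    · rwa [← pvCell_cast]
    · rwa [← pvCell_cast, Nat.cast_add, Nat.cast_one]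
  · rintro ⟨r, c, hr1, hc, h1, h3⟩
    refine ⟨r, c, by omega, hc, ?_⟩
    simp only [show (("D" : String) = "R") = False by simp, show (("D" : String) = "L") = False by simp,
      show (("D" : String) = "U") = False by simp,
      true_and, false_and, if_false, pv_ite_prop]
    refine ⟨by rwa [pvCell_cast], by omega, ?_⟩
    rwa [show ((r : Int) + 1) = ((r + 1 : Nat) : Int) by push_cast; ring, pvCell_cast]

theorem pv_down_iff (state : List (List Int)) (e : Int)
    (hrows : ∀ row ∈ state, (state.headD []).length ≤ row.length) :
    (pvCanStepDown (state.map (fun row => row.take (state.headD []).length)) e = true) ↔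
    ∃ r c : Nat, r + 1 < state.length ∧ c < (state.headD []).length ∧
      pvCellN state r c = e ∧ pvCellN state (r + 1) c ∉ pvBlockedSet := by
  set cols := (state.headD []).length with hc
  rw [pvCanStepDown]
  rw [pv_pairs_any _ [] (fun u v => (u.zip v).any fun q => q.1 == e && !(pvBlockedSet.contains q.2))]
  simp only [List.length_map]
  constructor
  · rintro ⟨i, hi, hf⟩
    have hu : (state.map (fun row => row.take cols)).getD i [] = (state[i]'(by omega)).take cols := by
      rw [List.getD_eq_getElem _ _ (by rw [List.length_map]; omega), List.getElem_map]
    have hv : (state.map (fun row => row.take cols)).getD (i+1) [] = (state[i+1]'(by omega)).take cols := by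
      rw [List.getD_eq_getElem _ _ (by rw [List.length_map]; omega), List.getElem_map]
    rw [hu, hv, pv_zip_any _ _ 0 (fun a b => a == e && !(pvBlockedSet.contains b))] at hf
    obtain ⟨j, hj1, hj2, hf⟩ := hf
    have hl1 : cols ≤ (state[i]'(by omega)).length := hrows _ (List.getElem_mem _)
    have hl2 : cols ≤ (state[i+1]'(by omega)).length := hrows _ (List.getElem_mem _)
    rw [List.length_take] at hj1 hj2
    rw [pv_getD_take _ cols _ (by omega) hl1, pv_getD_take _ cols _ (by omega) hl2] at hf
    simp only [Bool.and_eq_true, beq_iff_eq, Bool.not_eq_true'] at hf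
    refine ⟨i, j, hi, by omega, ?_, ?_⟩
    · rw [pvCellN_eq state i j (by omega), List.getD_eq_getElem?_getD]
      exact hf.1
    · have h2' := hf.2
      rw [Bool.eq_false_iff, Ne, List.contains_iff_mem] at h2'
      rw [pvCellN_eq state (i+1) j (by omega)]
      exact fun hm => h2' (by rw [List.getD_eq_getElem?_getD]; exact hm)
  · rintro ⟨r, c, hr1, hcc, h1, h2⟩
    refine ⟨r, hr1, ?_⟩
    have hu : (state.map (fun row => row.take cols)).getD r [] = (state[r]'(by omega)).take cols := by
      rw [List.getD_eq_getElem _ _ (by rw [List.length_map]; omega), List.getElem_map]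
    have hv : (state.map (fun row => row.take cols)).getD (r+1) [] = (state[r+1]'(by omega)).take cols := by
      rw [List.getD_eq_getElem _ _ (by rw [List.length_map]; omega), List.getElem_map]
    rw [hu, hv, pv_zip_any _ _ 0 (fun a b => a == e && !(pvBlockedSet.contains b))]
    have hl1 : cols ≤ (state[r]'(by omega)).length := hrows _ (List.getElem_mem _)
    have hl2 : cols ≤ (state[r+1]'(by omega)).length := hrows _ (List.getElem_mem _)
    refine ⟨c, by rw [List.length_take]; omega, by rw [List.length_take]; omega, ?_⟩
    rw [pv_getD_take _ cols _ (by omega) hl1, pv_getD_take _ cols _ (by omega) hl2]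
    simp only [Bool.and_eq_true, beq_iff_eq, Bool.not_eq_true']
    rw [pvCellN_eq state r c (by omega), List.getD_eq_getElem?_getD] at h1
    rw [pvCellN_eq state (r+1) c (by omega), List.getD_eq_getElem?_getD] at h2
    refine ⟨h1, ?_⟩
    rw [← Bool.not_eq_true, List.contains_iff_mem]
    exact h2

theorem pv_case_D (state : List (List Int)) (element : Int)
    (hpre : state ≠ [] ∧ ∀ row ∈ state, (state.headD []).length ≤ row.length) :
    check_movement state "D" element = check_movement_alt state "D" element := by
  obtain ⟨hne, hrows⟩ := hpre
  have hB : check_movement_alt state "D" element =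
      pvCanStepDown (state.map (fun row => row.take (state.headD []).length)) element := by
    simp [check_movement_alt]
  rw [hB, Bool.eq_iff_iff, pv_A_D, pv_down_iff state element hrows]
  have hset : pvBlockedSet = pvBlocked := by decide
  rw [hset]

theorem pv_A_U (state : List (List Int)) (e : Int) :
    (check_movement state "U" e = true) ↔
    ∃ r c : Nat, 1 ≤ r ∧ r < state.length ∧ c < (state.headD []).length ∧
      pvCellN state r c = e ∧ pvCellN state (r - 1) c ∉ pvBlocked := by
  simp only [check_movement]
  rw [show ((state.length : Int) - 1 + 1) = (state.length : Int) by omega,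
      show (((state.headD []).length : Int) - 1 + 1) = ((state.headD []).length : Int) by omega]
  rw [pv_pyRange2_any]
  constructor
  · rintro ⟨r, c, hr, hc, hb⟩
    simp only [show (("U" : String) = "R") = False by simp, show (("U" : String) = "D") = False by simp,
      show (("U" : String) = "L") = False by simp,
      true_and, false_and, if_false, pv_ite_prop] at hb
    obtain ⟨h1, h2, h3⟩ := hb
    refine ⟨r, c, by omega, hr, hc, ?_, ?_⟩
    · rwa [← pvCell_cast]
    · rwa [← pvCell_cast, show (((r - 1 : Nat) : Int)) = (r : Int) - 1 by omega]
  · rintro ⟨r, c, hr1, hr, hc, h1, h3⟩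
    refine ⟨r, c, hr, hc, ?_⟩
    simp only [show (("U" : String) = "R") = False by simp, show (("U" : String) = "D") = False by simp,
      show (("U" : String) = "L") = False by simp,
      true_and, false_and, if_false, pv_ite_prop]
    refine ⟨by rwa [pvCell_cast], by omega, ?_⟩
    rwa [show ((r : Int) - 1) = ((r - 1 : Nat) : Int) by omega, pvCell_cast]

theorem pv_up_iff (state : List (List Int)) (e : Int)
    (hrows : ∀ row ∈ state, (state.headD []).length ≤ row.length) :
    (pvCanStepDown (state.map (fun row => row.take (state.headD []).length)).reverse e = true) ↔
    ∃ r c : Nat, 1 ≤ r ∧ r < state.length ∧ c < (state.headD []).length ∧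
      pvCellN state r c = e ∧ pvCellN state (r - 1) c ∉ pvBlockedSet := by
  set cols := (state.headD []).length with hc
  rw [pvCanStepDown]
  rw [pv_pairs_any _ [] (fun u v => (u.zip v).any fun q => q.1 == e && !(pvBlockedSet.contains q.2))]
  simp only [List.length_reverse, List.length_map]
  have hgd : ∀ k : Nat, (hk : k < state.length) → (state.map (fun row => row.take cols)).getD k [] = (state[k]'hk).take cols := by
    intro k hk
    rw [List.getD_eq_getElem _ _ (by rw [List.length_map]; omega), List.getElem_map]
  constructor
  · rintro ⟨i, hi, hf⟩
    rw [pv_getD_reverse _ [] i (by rw [List.length_map]; omega),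
        pv_getD_reverse _ [] (i+1) (by rw [List.length_map]; omega)] at hf
    simp only [List.length_map] at hf
    rw [hgd _ (by omega), hgd _ (by omega),
        pv_zip_any _ _ 0 (fun a b => a == e && !(pvBlockedSet.contains b))] at hf
    obtain ⟨j, hj1, hj2, hf⟩ := hf
    have hl1 : cols ≤ (state[state.length-1-i]'(by omega)).length := hrows _ (List.getElem_mem _)
    have hl2 : cols ≤ (state[state.length-1-(i+1)]'(by omega)).length := hrows _ (List.getElem_mem _)
    rw [List.length_take] at hj1 hj2
    rw [pv_getD_take _ cols _ (by omega) hl1, pv_getD_take _ cols _ (by omega) hl2] at hf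
    simp only [Bool.and_eq_true, beq_iff_eq, Bool.not_eq_true'] at hf
    refine ⟨state.length - 1 - i, j, by omega, by omega, by omega, ?_, ?_⟩
    · rw [pvCellN_eq state _ j (by omega), List.getD_eq_getElem?_getD]
      exact hf.1
    · have h2' := hf.2
      rw [Bool.eq_false_iff, Ne, List.contains_iff_mem] at h2'
      rw [show state.length - 1 - i - 1 = state.length - 1 - (i + 1) by omega]
      rw [pvCellN_eq state _ j (by omega)]
      exact fun hm => h2' (by rw [List.getD_eq_getElem?_getD]; exact hm)
  · rintro ⟨r, c, hr1, hr, hcc, h1, h2⟩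
    refine ⟨state.length - 1 - r, by omega, ?_⟩
    rw [pv_getD_reverse _ [] _ (by rw [List.length_map]; omega),
        pv_getD_reverse _ [] _ (by rw [List.length_map]; omega)]
    simp only [List.length_map]
    rw [show state.length - 1 - (state.length - 1 - r) = r by omega, show state.length - 1 - (state.length - 1 - r + 1) = r - 1 by omega]
    rw [hgd _ (by omega), hgd _ (by omega),
        pv_zip_any _ _ 0 (fun a b => a == e && !(pvBlockedSet.contains b))]
    have hl1 : cols ≤ (state[r]'(by omega)).length := hrows _ (List.getElem_mem _)
    have hl2 : cols ≤ (state[r-1]'(by omega)).length := hrows _ (List.getElem_mem _)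
    refine ⟨c, by rw [List.length_take]; omega, by rw [List.length_take]; omega, ?_⟩
    rw [pv_getD_take _ cols _ (by omega) hl1, pv_getD_take _ cols _ (by omega) hl2]
    simp only [Bool.and_eq_true, beq_iff_eq, Bool.not_eq_true']
    rw [pvCellN_eq state r c (by omega), List.getD_eq_getElem?_getD] at h1
    rw [pvCellN_eq state (r-1) c (by omega), List.getD_eq_getElem?_getD] at h2
    refine ⟨h1, ?_⟩
    rw [← Bool.not_eq_true, List.contains_iff_mem]
    exact h2

theorem pv_case_U (state : List (List Int)) (element : Int)
    (hpre : state ≠ [] ∧ ∀ row ∈ state, (state.headD []).length ≤ row.length) :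
    check_movement state "U" element = check_movement_alt state "U" element := by
  obtain ⟨hne, hrows⟩ := hpre
  have hB : check_movement_alt state "U" element =
      pvCanStepDown (state.map (fun row => row.take (state.headD []).length)).reverse element := by
    simp [check_movement_alt]
  rw [hB, Bool.eq_iff_iff, pv_A_U, pv_up_iff state element hrows]
  have hset : pvBlockedSet = pvBlocked := by decide
  rw [hset]

theorem pv_case_other (state : List (List Int)) (move : String) (element : Int)
    (hR : move ≠ "R") (hL : move ≠ "L") (hD : move ≠ "D") (hU : move ≠ "U") :
    check_movement state move element = check_movement_alt state move element := by
  simp [check_movement, check_movement_alt, hR, hL, hD, hU]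

-- ===== VERDICT (by name: the statement is the Claim_ definition above) =====
theorem check_movement_spec : Claim_equal_check_movement := by
  intro state move element _ hpre
  show check_movement state move element = check_movement_alt state move element
  have hp : state ≠ [] ∧ ∀ row ∈ state, (state.headD []).length ≤ row.length := hpre
  by_cases hR : move = "R"
  · subst hR; exact pv_case_R state element hp
  by_cases hL : move = "L"
  · subst hL; exact pv_case_L state element hp
  by_cases hD : move = "D"
  · subst hD; exact pv_case_D state element hp
  by_cases hU : move = "U"
  · subst hU; exact pv_case_U state element hp
  exact pv_case_other state move element hR hL hD hU
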